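-- pv_equiv track=rewrite | github.com/JuhoJokinen67/Scrooge | scrooge.py | longestBearishTrend
-- ===== SOURCE A (Python) =====
-- def longestBearishTrend(prices):
-- 	longest = 0
-- 	currentLongest = 0
--
-- 	pricesListed = list(prices.values())
-- 	for i in range(1, len(pricesListed)):
-- 		if pricesListed[i] < pricesListed[i-1]:
-- 			currentLongest += 1
-- 			longest = max(currentLongest, longest)
-- 		else:
-- 			currentLongest = 0
--
-- 	return longest
-- ===== SOURCE B (Python) =====
-- def longestBearishTrend(prices):
-- 	vals = list(prices.values())
-- 	drops = [b < a for a, b in zip(vals, vals[1:])]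
-- 	n = len(drops)
-- 	best = 0
-- 	i = 0
-- 	while i < n:
-- 		j = i
-- 		while j < n and drops[j]:
-- 			j += 1
-- 		if j > i:
-- 			if j - i > best:
-- 				best = j - i
-- 			i = j
-- 		else:
-- 			i += 1
-- 	return best
-- ===== Notes on version B (the rewrite author's own statement) =====
-- stated objective: alternative
-- what changed: A keeps a running streak counter updated element-by-element; B first derives the boolean drop sequence from adjacent pairs and then measures maximal consecutive True-runs with a two-pointer run scan.
import Mathlib
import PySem

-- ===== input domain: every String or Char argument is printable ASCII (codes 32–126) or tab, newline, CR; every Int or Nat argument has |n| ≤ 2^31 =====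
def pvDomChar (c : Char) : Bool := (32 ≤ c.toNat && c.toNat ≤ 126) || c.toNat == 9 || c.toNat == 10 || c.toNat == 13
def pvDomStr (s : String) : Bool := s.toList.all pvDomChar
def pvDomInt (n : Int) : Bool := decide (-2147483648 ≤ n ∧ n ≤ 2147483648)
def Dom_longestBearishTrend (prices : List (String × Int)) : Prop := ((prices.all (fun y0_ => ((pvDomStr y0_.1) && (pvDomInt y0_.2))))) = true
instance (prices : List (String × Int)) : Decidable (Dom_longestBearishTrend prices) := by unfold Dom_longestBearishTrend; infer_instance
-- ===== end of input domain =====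

-- B replaces A's running-counter scan with a transform-then-scan-runs decomposition: it derives the
-- boolean "drop" sequence and measures maximal consecutive True-runs with a two-pointer scan
-- (objective: alternative; same O(n) cost).

-- ===== PORT A =====
def longestBearishTrend (prices : List (String × Int)) : Int :=
  let pricesListed := (PySem.Dict.mk prices).values
  let r := (PySem.List.pyRange 1 (PySem.List.len pricesListed) 1).foldl
    (fun (s : Int × Int) i =>
      if PySem.List.pyGetD pricesListed i 0 < PySem.List.pyGetD pricesListed (i - 1) 0 then
        (max (s.2 + 1) s.1, s.2 + 1)
      else
        (s.1, 0))
    (0, 0)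
  r.1

-- ===== PORT B =====
-- inner 'while j < n and drops[j]: j += 1'
def pvRunEnd (drops : List Bool) (j : Nat) : Nat :=
  if h : j < drops.length then
    if drops[j] then pvRunEnd drops (j + 1) else j
  else j
termination_by drops.length - j

-- outer 'while i < n' loop with accumulator best
def pvScan (drops : List Bool) (i : Nat) (best : Int) : Int :=
  if h : i < drops.length then
    let j := pvRunEnd drops i
    if hj : j > i then
      pvScan drops j (if (j : Int) - (i : Int) > best then (j : Int) - (i : Int) else best)
    else
      pvScan drops (i + 1) best
  else best
termination_by drops.length - i
decreasing_by
  · omega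
  · omega

def longestBearishTrend_alt (prices : List (String × Int)) : Int :=
  let vals := (PySem.Dict.mk prices).values
  let drops := (vals.zip (PySem.List.slice vals (some 1) none)).map (fun p => decide (p.2 < p.1))
  pvScan drops 0 0

-- ===== PRECONDITION & SPEC =====
def Spec_longestBearishTrend (prices : List (String × Int)) (out : Int) : Prop := out = longestBearishTrend_alt prices
instance (prices : List (String × Int)) (out : Int) : Decidable (Spec_longestBearishTrend prices out) := by unfold Spec_longestBearishTrend; infer_instance

-- ===== CLAIM (what is proved, stated in full; the proofs are below) =====
def Claim_equal_longestBearishTrend : Prop := ∀ (prices : List (String × Int)), Dom_longestBearishTrend prices → Spec_longestBearishTrend prices (longestBearishTrend prices)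

-- ===== LEMMAS AND PROOFS =====

-- A's loop step, expressed on the derived boolean (drop or not)
def pvStep (s : Int × Int) (d : Bool) : Int × Int :=
  if d then (max (s.2 + 1) s.1, s.2 + 1) else (s.1, 0)

-- the common spec of both loops: best streak, with the initial run continued from counter c
def pvH : Int → List Bool → Int
  | _, [] => 0
  | c, true :: ds => max (c + 1) (pvH (c + 1) ds)
  | _, false :: ds => pvH 0 ds

theorem pv_aux {σ : Type} (f : σ → Int → Int → σ) :
    ∀ (xs : List Int) (init : σ),
    (List.range (xs.length - 1)).foldl (fun acc k => f acc (xs.getD k 0) (xs.getD (k + 1) 0)) init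
    = (xs.zip xs.tail).foldl (fun acc p => f acc p.1 p.2) init := by
  intro xs
  match xs with
  | [] => intro init; simp
  | [x] => intro init; simp
  | x :: y :: t =>
    intro init
    have ih := pv_aux f (y :: t)
    simp only [List.length_cons, Nat.add_sub_cancel, List.range_succ_eq_map,
      List.foldl_cons, List.foldl_map, List.zip_cons_cons, List.tail_cons] at *
    simp only [List.getD_cons_zero, List.getD_cons_succ]
    rw [← ih]
    rfl

-- A's index loop over range(1, len) reading xs[i], xs[i-1] is the fold over adjacent pairs
theorem pv_two_idx_fold {σ : Type} (f : σ → Int → Int → σ) (xs : List Int) (init : σ) :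
    (PySem.List.pyRange 1 (PySem.List.len xs) 1).foldl
      (fun acc i => f acc (PySem.List.pyGetD xs (i - 1) 0) (PySem.List.pyGetD xs i 0)) init
    = (xs.zip xs.tail).foldl (fun acc p => f acc p.1 p.2) init := by
  rw [PySem.List.len_eq, PySem.List.pyRange_one, List.foldl_map, ← pv_aux f xs init]
  have h1 : ((xs.length : Int) - 1).toNat = xs.length - 1 := by omega
  rw [h1]
  apply PySem.List.foldl_congr_mem
  intro acc k hk
  have hk' : k < xs.length - 1 := by simpa using List.mem_range.mp hk
  have e1 : (1 : Int) + k - 1 = (k : Int) := by omega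
  have e2 : (1 : Int) + k = ((k + 1 : Nat) : Int) := by omega
  rw [e1, e2, PySem.List.pyGetD_natCast, PySem.List.pyGetD_natCast]

-- A's fold computes the max of the longest so far and the best streak continuing counter c
theorem pv_foldl_step (ds : List Bool) : ∀ (l c : Int), 0 ≤ l →
    (ds.foldl pvStep (l, c)).1 = max l (pvH c ds) := by
  induction ds with
  | nil => intro l c hl; simp [pvH]; omega
  | cons d ds ih =>
    intro l c hl
    cases d with
    | true =>
      simp only [List.foldl_cons, pvStep, if_true, pvH]
      rw [ih (max (c + 1) l) (c + 1) (by omega)]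
      omega
    | false =>
      simp only [List.foldl_cons, pvStep, pvH]
      rw [if_neg (by simp)]
      exact ih l 0 hl

theorem pvH_not_head_true (c : Int) (ds : List Bool) (h : ds.head? ≠ some true) :
    pvH c ds = pvH 0 ds := by
  match ds with
  | [] => rfl
  | true :: t => simp at h
  | false :: t => rfl

theorem pvH_replicate (k : Nat) : ∀ (c : Int) (rest : List Bool),
    pvH c (List.replicate (k + 1) true ++ rest) = max (c + (k + 1)) (pvH (c + (k + 1)) rest) := by
  induction k with
  | zero => intro c rest; simp [pvH]
  | succ k ih =>
    intro c rest
    rw [List.replicate_succ, List.cons_append]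
    show pvH c (true :: _) = _
    rw [show pvH c (true :: (List.replicate (k + 1) true ++ rest))
        = max (c + 1) (pvH (c + 1) (List.replicate (k + 1) true ++ rest)) from rfl, ih]
    have e : c + 1 + ((k : Int) + 1) = c + (((k + 1 : Nat) : Int) + 1) := by push_cast; ring
    rw [e]
    omega

-- specification of the inner while loop: it walks to the end of the True-run starting at i
theorem pvRunEnd_spec (n : Nat) : ∀ (drops : List Bool) (i : Nat),
    drops.length - i ≤ n → i ≤ drops.length →
    i ≤ pvRunEnd drops i ∧ pvRunEnd drops i ≤ drops.length ∧
    drops.drop i = List.replicate (pvRunEnd drops i - i) true ++ drops.drop (pvRunEnd drops i) ∧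
    (∀ h : pvRunEnd drops i < drops.length, drops[pvRunEnd drops i] = false) := by
  induction n with
  | zero =>
    intro drops i hn hi
    rw [pvRunEnd, dif_neg (by omega)]
    refine ⟨le_refl _, by omega, by simp, fun h => absurd h (by omega)⟩
  | succ n ih =>
    intro drops i hn hi
    rw [pvRunEnd]
    by_cases h : i < drops.length
    · rw [dif_pos h]
      by_cases hd : drops[i] = true
      · rw [if_pos hd]
        obtain ⟨h1, h2, h3, h4⟩ := ih drops (i + 1) (by omega) (by omega)
        refine ⟨by omega, h2, ?_, h4⟩
        rw [List.drop_eq_getElem_cons h, hd, h3]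
        have : pvRunEnd drops (i + 1) - i = (pvRunEnd drops (i + 1) - (i + 1)) + 1 := by omega
        rw [this, List.replicate_succ, List.cons_append]
      · rw [if_neg (by simpa using hd)]
        refine ⟨le_refl _, by omega, by simp, fun _ => by simpa using hd⟩
    · rw [dif_neg h]
      refine ⟨le_refl _, by omega, by simp [List.drop_eq_nil_of_le (by omega : drops.length ≤ i)],
        fun hh => absurd hh (by omega)⟩

-- the outer loop of B computes the same spec
theorem pvScan_eq (n : Nat) : ∀ (drops : List Bool) (i : Nat) (best : Int),
    drops.length - i ≤ n → 0 ≤ best →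
    pvScan drops i best = max best (pvH 0 (drops.drop i)) := by
  induction n with
  | zero =>
    intro drops i best hn hb
    rw [pvScan, dif_neg (by omega), List.drop_eq_nil_of_le (by omega)]
    simp [pvH]; omega
  | succ n ih =>
    intro drops i best hn hb
    rw [pvScan]
    by_cases h : i < drops.length
    · rw [dif_pos h]
      obtain ⟨h1, h2, h3, h4⟩ := pvRunEnd_spec (n + 1) drops i (by omega) (by omega)
      set j := pvRunEnd drops i with hj
      by_cases hgt : j > i
      · rw [dif_pos hgt]
        have hrep : drops.drop i = List.replicate ((j - i - 1) + 1) true ++ drops.drop j := by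
          rw [h3]; congr 1; congr 1; omega
        have hhead : (drops.drop j).head? ≠ some true := by
          rcases Nat.lt_or_ge j drops.length with hlt | hge
          · rw [List.drop_eq_getElem_cons hlt, h4 hlt]; simp
          · rw [List.drop_eq_nil_of_le hge]; simp
        have hH : pvH 0 (drops.drop i) = max ((j : Int) - i) (pvH 0 (drops.drop j)) := by
          rw [hrep, pvH_replicate, pvH_not_head_true _ _ hhead]
          have e1 : (0 : Int) + (((j - i - 1 : Nat) : Int) + 1) = (j : Int) - i := by omega
          rw [e1]
        have hbest' : (0 : Int) ≤ (if (j : Int) - (i : Int) > best then (j : Int) - (i : Int) else best) := by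
          split <;> omega
        rw [ih drops j _ (by omega) hbest', hH]
        split <;> omega
      · rw [dif_neg hgt]
        have hji : j = i := by omega
        simp only [hji] at h4
        have hd : drops[i] = false := h4 h
        rw [List.drop_eq_getElem_cons h, hd]
        show pvScan drops (i + 1) best = max best (pvH 0 (List.drop (i + 1) drops))
        exact ih drops (i + 1) best (by omega) hb
    · rw [dif_neg h, List.drop_eq_nil_of_le (by omega)]
      simp [pvH]; omega

-- ===== VERDICT (by name: the statement is the Claim_ definition above) =====
theorem longestBearishTrend_spec : Claim_equal_longestBearishTrend := by
  intro prices _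
  show longestBearishTrend prices = longestBearishTrend_alt prices
  unfold longestBearishTrend longestBearishTrend_alt
  simp only [PySem.List.slice_from_one]
  set vals := (PySem.Dict.mk prices).values with hv
  rw [pv_two_idx_fold (fun acc a b => if b < a then (max (acc.2 + 1) acc.1, acc.2 + 1) else (acc.1, 0)) vals ((0 : Int), (0 : Int))]
  rw [pvScan_eq ((vals.zip vals.tail).map (fun p => decide (p.2 < p.1))).length _ 0 0 (by omega) (le_refl 0)]
  rw [List.drop_zero, ← pv_foldl_step _ 0 0 (le_refl 0), List.foldl_map]
  apply congrArg
  apply PySem.List.foldl_congr_mem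
  intro acc p _
  by_cases hp : p.2 < p.1 <;> simp [pvStep, hp]
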